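-- pv_equiv track=rewrite | github.com/Olocool17/smollbonk | smollbonk.py | shortest_generator
-- ===== SOURCE A (Python) =====
-- import itertools
-- from typing import Generator, Callable
--
-- def shortest_generator(chars: str, max_len: int = 8) -> Generator[int, None, None]:
--     products_length = 1
--     products = itertools.product(chars, repeat=products_length)
--     while products_length <= max_len:
--         try:
--             yield "".join(next(products))
--         except StopIteration:
--             products_length += 1
--             products = itertools.product(chars, repeat=products_length)
-- ===== SOURCE B (Python) =====
-- def shortest_generator(chars: str, max_len: int = 8):
--     """BFS over the prefix tree rooted at the empty string: pop a node, yield it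
--     (except the root), and enqueue its one-character extensions while its length
--     is below max_len.  FIFO order gives strings by increasing length, then
--     lexicographically by chars order."""
--     queue = [""]
--     i = 0
--     while i < len(queue):
--         s = queue[i]
--         i += 1
--         if s:
--             yield s
--         if len(s) < max_len:
--             for c in chars:
--                 queue.append(s + c)
-- ===== Notes on version B (the rewrite author's own statement) =====
-- stated objective: alternative
-- what changed: Replaces itertools.product with StopIteration-driven iterator restarts by an explicit-queue breadth-first search over the prefix tree rooted at the empty string: each dequeued node is yielded (except the root) and its one-character extensions are enqueued while its length is below max_len; FIFO order reproduces product's length-then-lex order.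
import Mathlib
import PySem

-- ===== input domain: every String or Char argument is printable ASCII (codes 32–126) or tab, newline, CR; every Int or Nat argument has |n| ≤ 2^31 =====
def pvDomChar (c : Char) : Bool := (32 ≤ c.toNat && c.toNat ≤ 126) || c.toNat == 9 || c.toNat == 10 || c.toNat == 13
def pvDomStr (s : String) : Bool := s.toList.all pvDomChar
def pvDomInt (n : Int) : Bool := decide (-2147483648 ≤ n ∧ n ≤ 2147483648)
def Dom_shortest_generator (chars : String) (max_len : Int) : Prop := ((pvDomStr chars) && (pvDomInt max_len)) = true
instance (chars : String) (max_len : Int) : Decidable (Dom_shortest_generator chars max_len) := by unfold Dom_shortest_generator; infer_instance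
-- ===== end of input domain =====

-- B replaces itertools.product with StopIteration-driven restarts by an explicit-queue BFS over
-- the prefix tree rooted at "" (objective: alternative algorithm, same cost). Both are total;
-- the Python generators are modelled as the list of yielded strings.

-- ===== PORT A =====

-- itertools.product(chars, repeat=L) as a list, in product's order (first position slowest)
def pvProdA (cs : List Char) : Nat → List (List Char)
  | 0 => [[]]
  | L + 1 => cs.flatMap (fun c => (pvProdA cs L).map (fun p => c :: p))

-- the while-loop of A: `prods` is the remaining iterator; StopIteration = empty list
def pvLoopA (cs : List Char) (max_len : Int) (L : Nat) (prods : List (List Char)) : List String :=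
  if h : (L : Int) ≤ max_len then
    match prods with
    | p :: rest => String.mk p :: pvLoopA cs max_len L rest
    | [] => pvLoopA cs max_len (L + 1) (pvProdA cs (L + 1))
  else []
termination_by ((max_len + 1 - L).toNat, prods.length)
decreasing_by
  · exact Prod.Lex.right _ (Nat.lt_succ_self _)
  · exact Prod.Lex.left _ _ (by omega)

def shortest_generator (chars : String) (max_len : Int) : List String :=
  pvLoopA chars.toList max_len 1 (pvProdA chars.toList 1)

-- ===== PORT B =====

-- the `for c in chars: queue.append(s + c)` step, guarded by `len(s) < max_len`
def pvChildren (cs : List Char) (max_len : Int) (s : List Char) : List (List Char) :=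
  if (s.length : Int) < max_len then cs.map (fun c => s ++ [c]) else []

-- weight of a queue entry, used only to justify termination of the BFS loop
def pvW (n : Nat) (max_len : Int) (s : List Char) : Nat :=
  (n + 1) ^ ((max_len + 1 - (s.length : Int)).toNat)

theorem pvChildren_weight (cs : List Char) (max_len : Int) (s : List Char) :
    ((pvChildren cs max_len s).map (pvW cs.length max_len)).sum < pvW cs.length max_len s := by
  unfold pvChildren
  split_ifs with h
  · have hconst : ∀ c ∈ cs, pvW cs.length max_len (s ++ [c])
        = (cs.length + 1) ^ (max_len - (s.length : Int)).toNat := by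
      intro c _
      simp only [pvW, List.length_append, List.length_cons, List.length_nil]
      congr 1
      omega
    rw [List.map_map]
    simp only [Function.comp_def]
    rw [List.map_congr_left (fun c hc => hconst c hc), List.map_const',
      List.sum_replicate, smul_eq_mul]
    have he : (max_len + 1 - (s.length : Int)).toNat
        = (max_len - (s.length : Int)).toNat + 1 := by omega
    show _ < pvW cs.length max_len s
    rw [pvW, he, pow_succ']
    exact (Nat.mul_lt_mul_right (Nat.pow_pos (by omega))).mpr (by omega)
  · simp only [List.map_nil, List.sum_nil]
    exact Nat.pow_pos (by omega)

-- the while-loop of B: `pending` is queue[i:]; pop the head, yield it unless it is the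
-- empty string (the root), and append its extensions to the end of the queue
def pvBFS (cs : List Char) (max_len : Int) : List (List Char) → List String
  | [] => []
  | s :: pending =>
      if s = [] then pvBFS cs max_len (pending ++ pvChildren cs max_len s)
      else String.mk s :: pvBFS cs max_len (pending ++ pvChildren cs max_len s)
termination_by q => (q.map (pvW cs.length max_len)).sum
decreasing_by
  all_goals
    simp only [List.map_append, List.sum_append, List.map_cons, List.sum_cons]
    have := pvChildren_weight cs max_len s
    omega

def shortest_generator_alt (chars : String) (max_len : Int) : List String :=
  pvBFS chars.toList max_len [[]]

-- ===== PRECONDITION & SPEC =====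
def Spec_shortest_generator (chars : String) (max_len : Int) (out : List String) : Prop := out = shortest_generator_alt chars max_len
instance (chars : String) (max_len : Int) (out : List String) : Decidable (Spec_shortest_generator chars max_len out) := by unfold Spec_shortest_generator; infer_instance

-- ===== CLAIM (what is proved, stated in full; the proofs are below) =====
def Claim_equal_shortest_generator : Prop := ∀ (chars : String) (max_len : Int), Dom_shortest_generator chars max_len → Spec_shortest_generator chars max_len (shortest_generator chars max_len)

-- ===== LEMMAS AND PROOFS =====

-- BFS yields the current queue segment `a` (skipping empty strings), then continues on the
-- rest of the queue with a's children appended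
theorem pvBFS_append (cs : List Char) (max_len : Int) (a : List (List Char)) :
    ∀ b, pvBFS cs max_len (a ++ b)
      = a.flatMap (fun s => if s = [] then [] else [String.mk s])
        ++ pvBFS cs max_len (b ++ a.flatMap (pvChildren cs max_len)) := by
  induction a with
  | nil => intro b; simp
  | cons s a' ih =>
      intro b
      rw [List.cons_append, pvBFS]
      have harr : (a' ++ b) ++ pvChildren cs max_len s = a' ++ (b ++ pvChildren cs max_len s) := by
        simp
      split_ifs with hs
      · rw [harr, ih (b ++ pvChildren cs max_len s)]
        simp [hs, List.append_assoc]
      · rw [harr, ih (b ++ pvChildren cs max_len s)]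
        simp [hs, List.append_assoc]

-- every member of pvProdA cs L has length L
theorem pvProdA_length (cs : List Char) (L : Nat) : ∀ p ∈ pvProdA cs L, p.length = L := by
  induction L with
  | zero => simp [pvProdA]
  | succ L ih =>
      intro p hp
      simp only [pvProdA, List.mem_flatMap, List.mem_map] at hp
      obtain ⟨c, _, q, hq, rfl⟩ := hp
      simp [ih q hq]

-- product with repeat L+1 = product with repeat L, each extended by one last character
theorem pvProdA_snoc (cs : List Char) (L : Nat) :
    pvProdA cs (L + 1) = (pvProdA cs L).flatMap (fun p => cs.map (fun c => p ++ [c])) := by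
  induction L with
  | zero =>
      show cs.flatMap (fun c => [[c]]) = _
      induction cs with
      | nil => rfl
      | cons a t iht => simp_all [pvProdA]
  | succ L ih =>
      show cs.flatMap (fun c => (pvProdA cs (L + 1)).map (fun p => c :: p)) = _
      conv_lhs => rw [ih]
      rw [show pvProdA cs (L + 1)
            = cs.flatMap (fun c => (pvProdA cs L).map (fun p => c :: p)) from rfl]
      simp [List.flatMap_assoc, List.map_flatMap, List.flatMap_map, List.map_map, Function.comp_def]

-- A's loop first drains its current iterator, yielding each element
theorem pvLoopA_drain (cs : List Char) (m : Int) (L : Nat) (hL : (L : Int) ≤ m)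
    (prods : List (List Char)) :
    pvLoopA cs m L prods = prods.map String.mk ++ pvLoopA cs m L [] := by
  induction prods with
  | nil => simp
  | cons p rest ih =>
      rw [pvLoopA, dif_pos hL]
      simp [ih]

-- yielding a queue segment of nonempty strings = mapping String.mk over it
theorem pvYields_eq_map (l : List (List Char)) (hne : ∀ s ∈ l, s ≠ []) :
    l.flatMap (fun s => if s = [] then [] else [String.mk s]) = l.map String.mk := by
  induction l with
  | nil => rfl
  | cons p t ih =>
      rw [List.flatMap_cons, List.map_cons, if_neg (hne p (List.mem_cons_self)),
        ih (fun q hq => hne q (List.mem_cons_of_mem p hq))]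
      rfl

-- running BFS on the full level L of the prefix tree = A's loop at product length L
theorem level_eq (cs : List Char) (m : Int) (L : Nat) (hL1 : 1 ≤ L) (hLm : (L : Int) ≤ m) :
    pvBFS cs m (pvProdA cs L) = pvLoopA cs m L (pvProdA cs L) := by
  have hne : ∀ s ∈ pvProdA cs L, s ≠ [] := by
    intro s hs h
    have hlen : s.length = L := pvProdA_length cs L s hs
    rw [h] at hlen
    simp at hlen
    omega
  have hy := pvYields_eq_map (pvProdA cs L) hne
  have hstep := pvBFS_append cs m (pvProdA cs L) []
  rw [List.append_nil, List.nil_append] at hstep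
  rw [hstep, hy, pvLoopA_drain cs m L hLm, pvLoopA, dif_pos hLm]
  congr 1
  by_cases hnext : (L : Int) < m
  · have hch : (pvProdA cs L).flatMap (pvChildren cs m) = pvProdA cs (L + 1) := by
      rw [pvProdA_snoc]
      apply List.flatMap_congr
      intro s hs
      have : s.length = L := pvProdA_length cs L s hs
      simp [pvChildren, this, hnext]
    rw [hch, level_eq cs m (L + 1) (by omega) (by push_cast; omega)]
  · have hch : (pvProdA cs L).flatMap (pvChildren cs m) = [] := by
      apply List.flatMap_eq_nil_iff.mpr
      intro s hs
      have : s.length = L := pvProdA_length cs L s hs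
      simp [pvChildren, this, hnext]
    rw [hch, pvLoopA.eq_def, dif_neg (by push_cast; omega), pvBFS]
termination_by (m + 1 - L).toNat
decreasing_by omega

-- ===== VERDICT (by name: the statement is the Claim_ definition above) =====
theorem shortest_generator_spec : Claim_equal_shortest_generator := by
  intro chars max_len _
  unfold Spec_shortest_generator shortest_generator shortest_generator_alt
  rw [pvBFS, if_pos rfl]
  by_cases hm : (1 : Int) ≤ max_len
  · have h1 : [] ++ pvChildren chars.toList max_len [] = pvProdA chars.toList 1 := by
      simp only [pvChildren, List.length_nil, Nat.cast_zero, List.nil_append]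
      rw [if_pos (by omega)]
      induction chars.toList with
      | nil => rfl
      | cons c t iht => simp_all [pvProdA]
    rw [h1, level_eq chars.toList max_len 1 le_rfl (by exact_mod_cast hm)]
  · have h1 : [] ++ pvChildren chars.toList max_len [] = [] := by
      simp [pvChildren]
      intro h; omega
    rw [h1, pvBFS, pvLoopA.eq_def, dif_neg (by exact_mod_cast hm)]
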